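-- pv_equiv track=rewrite | github.com/doshirush1901/pantheon | scripts/email_openclaw_bridge.py | _is_feedback
-- ===== SOURCE A (Python) =====
-- def _is_feedback(body: str) -> bool:
--     """Detect if email is feedback/correction to previous response."""
--     feedback_indicators = [
--         "that is not correct",
--         "that's not right",
--         "you are wrong",
--         "wrong machine",
--         "wrong answer",
--         "not the atf",
--         "not the pf1",
--         "you need to fix",
--         "correction:",
--         "actually,",
--         "no, the",
--         "should be",
--         "instead use",
--         "fix this"
--     ]
--     body_lower = body.lower()
--     return any(indicator in body_lower for indicator in feedback_indicators)
-- ===== SOURCE B (Python) =====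
-- def _is_feedback(body: str) -> bool:
--     """Detect if email is feedback/correction to previous response."""
--     feedback_indicators = [
--         "that is not correct",
--         "that's not right",
--         "you are wrong",
--         "wrong machine",
--         "wrong answer",
--         "not the atf",
--         "not the pf1",
--         "you need to fix",
--         "correction:",
--         "actually,",
--         "no, the",
--         "should be",
--         "instead use",
--         "fix this"
--     ]
--     body_lower = body.lower()
--     # Single left-to-right pass over positions: at each position, test whether
--     # any indicator starts there (instead of N independent substring scans).
--     for i in range(len(body_lower)):
--         for indicator in feedback_indicators:
--             if body_lower.startswith(indicator, i):
--                 return True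
--     return False
-- ===== Notes on version B (the rewrite author's own statement) =====
-- stated objective: alternative
-- what changed: Replaces the 14 independent whole-body substring membership scans with one left-to-right pass over the positions of the lowercased body, testing at each position whether any indicator starts there.
import Mathlib
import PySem

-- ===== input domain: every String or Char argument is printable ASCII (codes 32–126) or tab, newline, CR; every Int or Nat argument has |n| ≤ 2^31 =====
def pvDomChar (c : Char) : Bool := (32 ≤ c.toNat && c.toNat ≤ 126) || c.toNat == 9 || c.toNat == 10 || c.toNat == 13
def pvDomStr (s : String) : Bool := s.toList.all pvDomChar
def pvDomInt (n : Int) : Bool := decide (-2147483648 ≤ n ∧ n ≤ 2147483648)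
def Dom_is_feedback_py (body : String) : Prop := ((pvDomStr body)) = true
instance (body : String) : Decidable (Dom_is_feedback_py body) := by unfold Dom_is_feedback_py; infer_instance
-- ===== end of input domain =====

-- B replaces A's 14 independent substring scans with one left-to-right pass over
-- positions of the lowercased body (alternative decomposition, same results).


-- ===== PORT A =====
-- the literal indicator list (shared verbatim by both Pythons)
def pvIndicators : List String :=
  ["that is not correct", "that's not right", "you are wrong", "wrong machine",
   "wrong answer", "not the atf", "not the pf1", "you need to fix",
   "correction:", "actually,", "no, the", "should be", "instead use", "fix this"]

-- any(indicator in body_lower for indicator in feedback_indicators)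
def is_feedback_py (body : String) : Bool :=
  let body_lower := PySem.Str.lower body
  pvIndicators.any (fun indicator => PySem.Str.isIn indicator body_lower)

-- ===== PORT B =====
-- for i in range(len(body_lower)): for ind in …: if body_lower.startswith(ind, i): return True
-- body_lower.startswith(ind, i) with 0 ≤ i ≤ len is exactly ind.isPrefixOf (chars.drop i)
def is_feedback_py_alt (body : String) : Bool :=
  let body_lower := (PySem.Str.lower body).toList
  (List.range body_lower.length).any (fun i =>
    pvIndicators.any (fun indicator => indicator.toList.isPrefixOf (body_lower.drop i)))

-- ===== PRECONDITION & SPEC =====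
def Spec_is_feedback_py (body : String) (out : Bool) : Prop := out = is_feedback_py_alt body
instance (body : String) (out : Bool) : Decidable (Spec_is_feedback_py body out) := by unfold Spec_is_feedback_py; infer_instance

-- ===== CLAIM (what is proved, stated in full; the proofs are below) =====
def Claim_equal_is_feedback_py : Prop := ∀ (body : String), Dom_is_feedback_py body → Spec_is_feedback_py body (is_feedback_py body)

-- ===== LEMMAS AND PROOFS =====

theorem pvIndicators_ne_nil : ∀ ind ∈ pvIndicators, ind.toList ≠ [] := by decide

theorem pv_infix_iff_prefix_drop (l s : List Char) (h : l ≠ []) :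
    l <:+: s ↔ ∃ i < s.length, l <+: s.drop i := by
  constructor
  · rintro ⟨t, u, rfl⟩
    refine ⟨t.length, ?_, ?_⟩
    · have hl : 0 < l.length := List.length_pos_of_ne_nil h
      simp only [List.length_append]
      omega
    · have hd : ((t ++ l) ++ u).drop t.length = l ++ u := by
        simp [List.append_assoc]
      rw [hd]
      exact ⟨u, rfl⟩
  · rintro ⟨i, _, hp⟩
    exact hp.isInfix.trans (List.drop_suffix i s).isInfix

theorem pv_main (body : String) : is_feedback_py body = is_feedback_py_alt body := by
  simp only [is_feedback_py, is_feedback_py_alt]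
  rw [Bool.eq_iff_iff]
  simp only [List.any_eq_true, PySem.Str.isIn_iff_infix, List.isPrefixOf_iff_prefix,
    List.mem_range]
  constructor
  · rintro ⟨ind, hind, hinf⟩
    obtain ⟨i, hi, hp⟩ :=
      (pv_infix_iff_prefix_drop _ _ (pvIndicators_ne_nil ind hind)).mp hinf
    exact ⟨i, hi, ind, hind, hp⟩
  · rintro ⟨i, _, ind, hind, hp⟩
    exact ⟨ind, hind, hp.isInfix.trans (List.drop_suffix i _).isInfix⟩

-- ===== VERDICT (by name: the statement is the Claim_ definition above) =====
theorem is_feedback_py_spec : Claim_equal_is_feedback_py := by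
  intro body _
  show is_feedback_py body = is_feedback_py_alt body
  exact pv_main body
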